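-- pv_equiv track=rewrite | github.com/LemaireValentin/GraphTheory | Devoir 1/template.py | color_k_neigh
-- ===== SOURCE A (Python) =====
-- def color_degree(A):
--     """
--     Input :
--         - A an adjacency matrix (array of arrays)
--
--     Return an array containing the degrees of the nodes of A
--     """
--
--     return [sum(A[i]) + A[i][i] for i in range(len(A))]
--
-- def color_k_neigh(A, k):
--     """
--     Input :
--         - A an adjacency matrix (array of arrays)
--         - k the size of the neighbourhood of the coloring scheme
--
--     Return an array containing the colors as defined in Q4 of the project statement
--     The colors have to be structured as a sorted tuple of pairs (k, deg(v))
--     """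
--     degs = color_degree(A)
--     neigh = [[(0, degs[i])] for i in range(len(A))]
--     B = [[int(i == j) for i in range(len(A))] for j in range(len(A))]
--     isPath = [[int(i == j) for i in range(len(A))] for j in range(len(A))]
--
--     for iter in range(1, k+1):
--         B = [[sum([a*b for a, b in zip(row, col)]) for col in zip(*B)] for row in A]
--
--         for i in range(len(A)):
--             for j in range(len(A)):
--                 if B[i][j] > 0:
--                     isPath[i][j] = 1
--
--                 if isPath[i][j] == 1:
--                     neigh[i].append((iter, degs[j]))
--
--     for i in range(len(A)):
--         neigh[i] = tuple(sorted(neigh[i], key=lambda tup: (tup[0], tup[1])))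
--
--     return neigh
-- ===== SOURCE B (Python) =====
-- def color_k_neigh(A, k):
--     n = len(A)
--     degs = [sum(row) + row[i] for i, row in enumerate(A)]
--     # first-hit times: fh[i][j] = smallest t in 1..k with (A^t)[i][j] > 0, else None
--     fh = [[None] * n for _ in range(n)]
--     P = [[1 if i == j else 0 for j in range(n)] for i in range(n)]
--     for t in range(1, k + 1):
--         if all(all(e == 0 for e in r) for r in P) or all(all(x is not None for x in r) for r in fh):
--             break  # no further entry of fh can ever change
--         Q = []
--         for row in A:
--             m = min(len(row), n)
--             Q.append([sum(row[u] * P[u][c] for u in range(m)) for c in range(n)])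
--         P = Q
--         fh = [[t if (fh[i][j] is None and P[i][j] > 0) else fh[i][j] for j in range(n)]
--               for i in range(n)]
--     out = []
--     for i in range(n):
--         pairs = [(0, degs[i])]
--         for j in range(n):
--             s = 1 if j == i else fh[i][j]
--             if s is not None:
--                 pairs += [(t, degs[j]) for t in range(s, k + 1)]
--         out.append(tuple(sorted(pairs)))
--     return out
-- ===== Notes on version B (the rewrite author's own statement) =====
-- stated objective: alternative
-- what changed: Instead of A's per-iteration pass that re-marks an isPath matrix and appends (iter, deg) pairs for every already-reached node in every iteration, B records only the FIRST iteration at which each (i,j) becomes reachable (stopping the power iteration early once the power matrix is all zero or every first-hit time is set) and then emits each node's (t, deg) pairs directly as ranges from those first-hit times; intended as faster (the probe measured B ~9-15x ahead where both versions finished) but unconfirmed at the largest sizes, where both time out.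
import Mathlib
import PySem

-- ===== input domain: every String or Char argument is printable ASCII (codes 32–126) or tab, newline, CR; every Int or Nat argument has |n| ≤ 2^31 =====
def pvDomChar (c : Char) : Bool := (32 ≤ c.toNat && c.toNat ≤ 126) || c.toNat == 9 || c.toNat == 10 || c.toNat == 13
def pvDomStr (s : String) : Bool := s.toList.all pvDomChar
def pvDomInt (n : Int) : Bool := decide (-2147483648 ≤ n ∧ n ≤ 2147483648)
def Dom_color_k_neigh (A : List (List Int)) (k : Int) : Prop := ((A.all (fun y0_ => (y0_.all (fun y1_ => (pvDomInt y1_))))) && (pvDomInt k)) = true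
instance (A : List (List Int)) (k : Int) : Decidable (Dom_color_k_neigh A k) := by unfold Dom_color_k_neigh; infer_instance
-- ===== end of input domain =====

-- B records the FIRST iteration at which each (i,j) becomes reachable (stopping the matrix
-- iteration early once nothing can change) and then emits each node's (t, deg) pairs directly,
-- instead of A's re-marking and re-appending pass in every iteration (objective: alternative;
-- intended as faster: a timing run measured B ~9-15x ahead where both versions finished,
-- unconfirmed at the largest generated sizes, where both time out).

-- ===== PORT A =====
-- zip(*B): the list of columns, truncated to the shortest row
def pvZipStar (m : List (List Int)) : List (List Int) :=
  let cols := match m with | [] => 0 | r :: rs => rs.foldl (fun a r => min a r.length) r.length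
  (List.range cols).map (fun c => m.map (fun r => r.getD c 0))

-- sum([a*b for a, b in zip(row, col)])
def pvDot (row col : List Int) : Int := ((row.zip col).map (fun p => p.1 * p.2)).sum

-- [[sum(...) for col in zip(*B)] for row in A]
def pvMulA (A B : List (List Int)) : List (List Int) :=
  A.map (fun row => (pvZipStar B).map (fun col => pvDot row col))

def color_k_neigh (A : List (List Int)) (k : Int) : List (List (Int × Int)) :=
  let n := A.length
  let degs := (List.range n).map (fun i => (A.getD i []).sum + (A.getD i []).getD i 0)
  let neigh0 := (List.range n).map (fun i => [((0 : Int), degs.getD i 0)])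
  let id0 := (List.range n).map (fun j => (List.range n).map (fun i => if i = j then (1 : Int) else 0))
  let fin := (PySem.List.pyRange 1 (k + 1)).foldl (fun st iter =>
      let B := pvMulA A st.1
      let inner := (List.range n).foldl (fun st2 i =>
          (List.range n).foldl (fun (st3 : List (List Int) × List (List (Int × Int))) j =>
              let isP := if 0 < (B.getD i []).getD j 0 then st3.1.set i ((st3.1.getD i []).set j 1) else st3.1
              let ne := if (isP.getD i []).getD j 0 = 1 then st3.2.set i ((st3.2.getD i []) ++ [(iter, degs.getD j 0)]) else st3.2
              (isP, ne)) st2) (st.2.1, st.2.2)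
      (B, inner.1, inner.2)) (id0, id0, neigh0)
  fin.2.2.map (fun l => PySem.List.sorted2 l (fun p => p.1) (fun p => p.2))

-- ===== PORT B =====
-- [sum(row[u]*P[u][c] for u in range(m)) for c in range(n)], m = min(len(row), n)
def pvMulB (A P : List (List Int)) (n : Nat) : List (List Int) :=
  A.map (fun row => (List.range n).map (fun c =>
    ((List.range (min row.length n)).map (fun u => row.getD u 0 * (P.getD u []).getD c 0)).sum))

def color_k_neigh_alt (A : List (List Int)) (k : Int) : List (List (Int × Int)) :=
  let n := A.length
  let degs := (PySem.List.enumerate A).map (fun p => p.2.sum + PySem.List.pyGetD p.2 p.1 0)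
  let init : List (List Int) × List (List (Option Int)) :=
    ((List.range n).map (fun i => (List.range n).map (fun j => if i = j then (1 : Int) else 0)),
     (List.range n).map (fun _ => List.replicate n (none : Option Int)))
  -- the 'break' is ported as identity steps: once the guard holds the state never changes again
  let fin := (PySem.List.pyRange 1 (k + 1)).foldl (fun st t =>
      if st.1.all (fun r => r.all (fun e => e == 0)) || st.2.all (fun r => r.all (fun x => !x.isNone)) then st
      else
        let P := pvMulB A st.1 n
        let fh := (List.range n).map (fun i => (List.range n).map (fun j =>
            if (st.2.getD i []).getD j none = none ∧ 0 < (P.getD i []).getD j 0 then some t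
            else (st.2.getD i []).getD j none))
        (P, fh)) init
  (List.range n).map (fun i =>
    PySem.List.sorted2
      ((List.range n).foldl (fun pairs j =>
          match (if j = i then some (1 : Int) else (fin.2.getD i []).getD j none) with
          | some s => pairs ++ (PySem.List.pyRange s (k + 1)).map (fun t => (t, degs.getD j 0))
          | none => pairs) [((0 : Int), degs.getD i 0)])
      (fun p => p.1) (fun p => p.2))

-- ===== PRECONDITION & SPEC =====
-- Pre_ excludes exactly the inputs where Python raises IndexError: some row i shorter than i+1,
-- so that A[i][i] in color_degree is out of range (both A and B raise there).
def Pre_color_k_neigh (A : List (List Int)) (k : Int) : Prop :=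
  ∀ i < A.length, i < (A.getD i []).length
instance (A : List (List Int)) (k : Int) : Decidable (Pre_color_k_neigh A k) := by
  unfold Pre_color_k_neigh; infer_instance

def pvWitness_color_k_neigh : List (List Int) × Int := ([[0, 1], [1, 0]], 2)

def Spec_color_k_neigh (A : List (List Int)) (k : Int) (out : List (List (Int × Int))) : Prop := out = color_k_neigh_alt A k
instance (A : List (List Int)) (k : Int) (out : List (List (Int × Int))) : Decidable (Spec_color_k_neigh A k out) := by unfold Spec_color_k_neigh; infer_instance

-- ===== CLAIM (what is proved, stated in full; the proofs are below) =====
def Claim_equal_color_k_neigh : Prop := ∀ (A : List (List Int)) (k : Int), Dom_color_k_neigh A k → Pre_color_k_neigh A k → Spec_color_k_neigh A k (color_k_neigh A k)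

-- ===== LEMMAS AND PROOFS =====

-- ---------- small list utilities ----------
lemma getD_set_self {α : Type} (l : List α) (i : Nat) (x d : α) (h : i < l.length) :
    (l.set i x).getD i d = x := by
  simp [List.getD, h]

lemma getD_set_ne {α : Type} (l : List α) (i j : Nat) (x d : α) (h : i ≠ j) :
    (l.set i x).getD j d = l.getD j d := by
  simp [List.getD, h]

lemma set_getD_self {α : Type} (l : List α) (i : Nat) (d : α) (h : i < l.length) :
    l.set i (l.getD i d) = l := by
  rw [List.getD_eq_getElem l d h]; exact List.set_getElem_self h

lemma foldl_min_const (l : List (List Int)) (c : Nat) (h : ∀ r ∈ l, r.length = c) :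
    l.foldl (fun a r => min a r.length) c = c := by
  induction l with
  | nil => rfl
  | cons r rs ih =>
      have hr := h r (by simp)
      simp only [List.foldl_cons, hr, min_self]
      exact ih (fun r hm => h r (by simp [hm]))

lemma flatMap_comm_perm {α β γ : Type} (l₁ : List α) (l₂ : List β) (h : α → β → List γ) :
    (l₁.flatMap fun a => l₂.flatMap fun b => h a b).Perm
      (l₂.flatMap fun b => l₁.flatMap fun a => h a b) := by
  rw [← Multiset.coe_eq_coe]
  simp only [← Multiset.coe_bind]
  exact Multiset.bind_bind _ _

-- ---------- sorted2 is determined by the multiset (lexicographic identity key) ----------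
def lexLe (p q : Int × Int) : Prop := p.1 < q.1 ∨ (p.1 = q.1 ∧ p.2 ≤ q.2)

lemma insertBy_pairwise_lex (x : Int × Int) (ys : List (Int × Int))
    (h : ys.Pairwise lexLe) :
    (PySem.List.insertBy
      (fun a b => decide (a.1 < b.1) || (!decide (b.1 < a.1) && decide (a.2 < b.2))) x ys).Pairwise lexLe := by
  induction ys with
  | nil => simp [PySem.List.insertBy, lexLe]
  | cons y ys ih =>
      rw [PySem.List.insertBy]
      by_cases hb : (decide (x.1 < y.1) || (!decide (y.1 < x.1) && decide (x.2 < y.2))) = true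
      · rw [if_pos hb]
        have hxy : lexLe x y := by
          simp only [Bool.or_eq_true, Bool.and_eq_true, Bool.not_eq_true', decide_eq_true_eq,
            decide_eq_false_iff_not] at hb
          unfold lexLe; omega
        constructor
        · intro z hz
          rcases List.mem_cons.mp hz with hz | hz
          · subst hz; exact hxy
          · have hyz := (List.pairwise_cons.mp h).1 z hz
            unfold lexLe at *; omega
        · exact h
      · rw [if_neg hb]
        have hyx : lexLe y x := by
          simp only [Bool.or_eq_true, Bool.and_eq_true, Bool.not_eq_true', decide_eq_true_eq,
            decide_eq_false_iff_not, not_or, not_and] at hb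
          unfold lexLe; omega
        constructor
        · intro z hz
          rcases (PySem.List.mem_insertBy _ _ _ _).mp hz with hz | hz
          · subst hz; exact hyx
          · exact (List.pairwise_cons.mp h).1 z hz
        · exact ih (List.pairwise_cons.mp h).2

lemma foldl_insertBy_pairwise_lex (xs acc : List (Int × Int)) (h : acc.Pairwise lexLe) :
    (xs.foldl (fun acc x => PySem.List.insertBy
      (fun a b => decide (a.1 < b.1) || (!decide (b.1 < a.1) && decide (a.2 < b.2))) x acc) acc
      ).Pairwise lexLe := by
  induction xs generalizing acc with
  | nil => exact h
  | cons x xs ih => exact ih _ (insertBy_pairwise_lex x acc h)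

lemma sorted2_pairwise_lex (l : List (Int × Int)) :
    (PySem.List.sorted2 l (fun p => p.1) (fun p => p.2)).Pairwise lexLe := by
  have : PySem.List.sorted2 l (fun p => p.1) (fun p => p.2)
      = l.foldl (fun acc x => PySem.List.insertBy
          (fun a b => decide (a.1 < b.1) || (!decide (b.1 < a.1) && decide (a.2 < b.2))) x acc) [] := by
    rfl
  rw [this]
  exact foldl_insertBy_pairwise_lex l [] (by simp)

lemma sorted2_eq_of_perm (l₁ l₂ : List (Int × Int)) (h : l₁.Perm l₂) :
    PySem.List.sorted2 l₁ (fun p => p.1) (fun p => p.2)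
      = PySem.List.sorted2 l₂ (fun p => p.1) (fun p => p.2) := by
  apply List.Perm.eq_of_pairwise (le := lexLe)
  · intro a b _ _ hab hba
    unfold lexLe at hab hba
    have : a.1 = b.1 ∧ a.2 = b.2 := by omega
    exact Prod.ext this.1 this.2
  · exact sorted2_pairwise_lex l₁
  · exact sorted2_pairwise_lex l₂
  · exact ((PySem.List.sorted2_perm l₁ _ _ _).trans h).trans (PySem.List.sorted2_perm l₂ _ _ _).symm

-- ---------- proof-side data of the computation ----------
def degsOf (A : List (List Int)) : List Int :=
  (List.range A.length).map (fun i => (A.getD i []).sum + (A.getD i []).getD i 0)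

-- the k-th power of A, computed with B's (index-based) product
def powM (A : List (List Int)) : Nat → List (List Int)
  | 0 => (List.range A.length).map (fun j => (List.range A.length).map (fun i => if i = j then (1 : Int) else 0))
  | t + 1 => pvMulB A (powM A t) A.length

def pwE (A : List (List Int)) (t i j : Nat) : Int := ((powM A t).getD i []).getD j 0

-- first-hit times (entry level)
def fhE (A : List (List Int)) : Nat → Nat → Nat → Option Int
  | 0, _, _ => none
  | t + 1, i, j => if fhE A t i j = none ∧ 0 < pwE A (t + 1) i j then some ((t : Int) + 1) else fhE A t i j

def fhM (A : List (List Int)) (t : Nat) : List (List (Option Int)) :=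
  (List.range A.length).map (fun i => (List.range A.length).map (fun j => fhE A t i j))

-- A's isPath matrix (entry level)
def mkE (A : List (List Int)) : Nat → Nat → Nat → Int
  | 0, i, j => if i = j then 1 else 0
  | t + 1, i, j => if 0 < pwE A (t + 1) i j then 1 else mkE A t i j

def mkM (A : List (List Int)) (t : Nat) : List (List Int) :=
  (List.range A.length).map (fun i => (List.range A.length).map (fun j => mkE A t i j))

def emitL (A : List (List Int)) (t : Nat) (i : Nat) : List (Int × Int) :=
  (List.range A.length).filterMap
    (fun j => if mkE A t i j = 1 then some (((t : Nat) : Int), (degsOf A).getD j 0) else none)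

def nRow (A : List (List Int)) (i : Nat) : Nat → List (Int × Int)
  | 0 => [((0 : Int), (degsOf A).getD i 0)]
  | t + 1 => nRow A i t ++ emitL A (t + 1) i

def nAcc (A : List (List Int)) (t : Nat) : List (List (Int × Int)) :=
  (List.range A.length).map (fun i => nRow A i t)

-- ---------- shapes ----------
lemma powM_length (A : List (List Int)) (t : Nat) : (powM A t).length = A.length := by
  cases t <;> simp [powM, pvMulB]

lemma powM_rows (A : List (List Int)) (t : Nat) : ∀ r ∈ powM A t, r.length = A.length := by
  cases t <;> · intro r hr; simp only [powM, pvMulB, List.mem_map] at hr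
                obtain ⟨x, _, rfl⟩ := hr; simp

-- ---------- A's product equals B's product on rectangular input ----------
lemma mulA_eq_mulB (A B : List (List Int)) (h1 : B.length = A.length)
    (h2 : ∀ r ∈ B, r.length = A.length) : pvMulA A B = pvMulB A B A.length := by
  have hzip : pvZipStar B = (List.range A.length).map (fun c => B.map (fun r => r.getD c 0)) := by
    unfold pvZipStar
    cases B with
    | nil =>
        have : A.length = 0 := h1.symm
        simp [this]
    | cons r rs =>
        have hr : r.length = A.length := h2 r (by simp)
        have : rs.foldl (fun a r => min a r.length) r.length = A.length := by
          rw [hr]; exact foldl_min_const rs A.length (fun r hm => h2 r (by simp [hm]))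
        simp only [this]
  unfold pvMulA pvMulB
  apply List.map_congr_left; intro row _
  rw [hzip, List.map_map]
  apply List.map_congr_left; intro c _
  unfold pvDot
  refine congrArg List.sum ?_
  apply List.ext_getElem
  · simp [h1]
  · intro u hu1 hu2
    simp only [List.length_map, List.length_zip, List.length_map] at hu1
    have hur : u < row.length := lt_of_lt_of_le hu1 (by omega)
    have hub : u < B.length := lt_of_lt_of_le hu1 (by omega)
    simp only [List.getElem_map, List.getElem_zip, List.getElem_range]
    rw [List.getD_eq_getElem row 0 hur, List.getD_eq_getElem B [] hub]

-- ---------- A's inner double loop ----------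
def rowL (Bm : List (List Int)) (degs : List Int) (iter : Int) (i : Nat) :
    List Nat → List Int × List (Int × Int) → List Int × List (Int × Int)
  | [], st => st
  | j :: js, st =>
      let r' := if 0 < (Bm.getD i []).getD j 0 then st.1.set j 1 else st.1
      let e' := if r'.getD j 0 = 1 then st.2 ++ [(iter, degs.getD j 0)] else st.2
      rowL Bm degs iter i js (r', e')

def updR (Bm : List (List Int)) (i : Nat) (js : List Nat) (r : List Int) : List Int :=
  js.foldl (fun r j => if 0 < (Bm.getD i []).getD j 0 then r.set j 1 else r) r

def innerF (Bm : List (List Int)) (degs : List Int) (iter : Int) (i : Nat)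
    (st3 : List (List Int) × List (List (Int × Int))) (j : Nat) :
    List (List Int) × List (List (Int × Int)) :=
  let isP' := if 0 < (Bm.getD i []).getD j 0 then st3.1.set i ((st3.1.getD i []).set j 1) else st3.1
  let ne' := if (isP'.getD i []).getD j 0 = 1 then st3.2.set i ((st3.2.getD i []) ++ [(iter, degs.getD j 0)]) else st3.2
  (isP', ne')

def outerF (Bm : List (List Int)) (degs : List Int) (iter : Int) (n : Nat)
    (st2 : List (List Int) × List (List (Int × Int))) (i : Nat) :
    List (List Int) × List (List (Int × Int)) :=
  (List.range n).foldl (innerF Bm degs iter i) st2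

lemma foldl_inner (Bm : List (List Int)) (degs : List Int) (iter : Int) (i : Nat) (js : List Nat)
    (isP : List (List Int)) (ne : List (List (Int × Int)))
    (hi1 : i < isP.length) (hi2 : i < ne.length) :
    js.foldl (innerF Bm degs iter i) (isP, ne)
      = (isP.set i (rowL Bm degs iter i js (isP.getD i [], ne.getD i [])).1,
         ne.set i (rowL Bm degs iter i js (isP.getD i [], ne.getD i [])).2) := by
  induction js generalizing isP ne with
  | nil =>
      simp only [List.foldl_nil, rowL]
      rw [set_getD_self _ _ _ hi1, set_getD_self _ _ _ hi2]
  | cons j js ih =>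
      rw [List.foldl_cons]
      have hr' : innerF Bm degs iter i (isP, ne) j
          = (isP.set i (if 0 < (Bm.getD i []).getD j 0 then (isP.getD i []).set j 1 else isP.getD i []),
             ne.set i (if (if 0 < (Bm.getD i []).getD j 0 then (isP.getD i []).set j 1 else isP.getD i []).getD j 0 = 1
                       then ne.getD i [] ++ [(iter, degs.getD j 0)] else ne.getD i [])) := by
        simp only [innerF]
        by_cases hc : 0 < (Bm.getD i []).getD j 0
        · simp only [if_pos hc]
          rw [getD_set_self _ _ _ _ hi1]
          split
          · rfl
          · rw [set_getD_self _ _ _ hi2]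
        · simp only [if_neg hc]
          rw [set_getD_self _ _ _ hi1]
          split
          · rfl
          · rw [set_getD_self _ _ _ hi2]
      rw [hr']
      rw [ih _ _ (by simpa using hi1) (by simpa using hi2)]
      rw [getD_set_self _ _ _ _ hi1, getD_set_self _ _ _ _ hi2, List.set_set, List.set_set]
      show _ = (isP.set i (rowL Bm degs iter i (j :: js) (isP.getD i [], ne.getD i [])).1,
                ne.set i (rowL Bm degs iter i (j :: js) (isP.getD i [], ne.getD i [])).2)
      rfl

lemma rowL_spec (Bm : List (List Int)) (degs : List Int) (iter : Int) (i : Nat)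
    (js : List Nat) (r : List Int) (e : List (Int × Int))
    (hnd : js.Nodup) (hjs : ∀ j ∈ js, j < r.length) :
    rowL Bm degs iter i js (r, e)
      = (updR Bm i js r,
         e ++ js.filterMap (fun j =>
            if 0 < (Bm.getD i []).getD j 0 ∨ r.getD j 0 = 1 then some (iter, degs.getD j 0) else none)) := by
  induction js generalizing r e with
  | nil => simp [rowL, updR]
  | cons j js ih =>
      have hjr : j < r.length := hjs j (by simp)
      have hjns : j ∉ js := (List.nodup_cons.mp hnd).1
      have hstep : rowL Bm degs iter i (j :: js) (r, e)
          = rowL Bm degs iter i js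
              ((if 0 < (Bm.getD i []).getD j 0 then r.set j 1 else r),
               (if 0 < (Bm.getD i []).getD j 0 ∨ r.getD j 0 = 1 then e ++ [(iter, degs.getD j 0)] else e)) := by
        by_cases hc : 0 < (Bm.getD i []).getD j 0
        · have h1 : (1 : Int) = 1 ↔ True := by simp
          simp only [rowL, if_pos hc, getD_set_self r j 1 0 hjr, if_true,
            if_pos (Or.inl hc : 0 < (Bm.getD i []).getD j 0 ∨ r.getD j 0 = 1)]
        · have hor : (0 < (Bm.getD i []).getD j 0 ∨ r.getD j 0 = 1) ↔ r.getD j 0 = 1 :=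
            or_iff_right hc
          simp only [rowL, if_neg hc, hor]
      rw [hstep, ih _ _ (List.nodup_cons.mp hnd).2
        (by intro x hx
            have := hjs x (by simp [hx])
            split <;> simpa using this)]
      refine Prod.ext ?_ ?_
      · rfl
      · have hcongr : (js.filterMap (fun j' =>
            if 0 < (Bm.getD i []).getD j' 0 ∨ (if 0 < (Bm.getD i []).getD j 0 then r.set j 1 else r).getD j' 0 = 1
            then some (iter, degs.getD j' 0) else none))
          = js.filterMap (fun j' =>
            if 0 < (Bm.getD i []).getD j' 0 ∨ r.getD j' 0 = 1 then some (iter, degs.getD j' 0) else none) := by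
          apply List.filterMap_congr
          intro x hx
          have hxj : x ≠ j := fun hh => hjns (hh ▸ hx)
          split
          · rw [getD_set_ne _ _ _ _ _ (fun hh => hxj hh.symm)]
          · rfl
        rw [hcongr, List.filterMap_cons]
        by_cases hc : 0 < (Bm.getD i []).getD j 0 ∨ r.getD j 0 = 1
        · simp only [if_pos hc, List.append_assoc, List.singleton_append]
        · simp only [if_neg hc]

lemma updR_length (Bm : List (List Int)) (i : Nat) (js : List Nat) (r : List Int) :
    (updR Bm i js r).length = r.length := by
  induction js generalizing r with
  | nil => rfl
  | cons j js ih =>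
      show (updR Bm i js (if 0 < (Bm.getD i []).getD j 0 then r.set j 1 else r)).length = r.length
      rw [ih]; split <;> simp

lemma updR_getD (Bm : List (List Int)) (i : Nat) (js : List Nat) (r : List Int) (p : Nat)
    (hp : p < r.length) :
    (updR Bm i js r).getD p 0
      = if p ∈ js ∧ 0 < (Bm.getD i []).getD p 0 then 1 else r.getD p 0 := by
  induction js generalizing r with
  | nil => simp [updR]
  | cons j js ih =>
      have hstep : updR Bm i (j :: js) r = updR Bm i js (if 0 < (Bm.getD i []).getD j 0 then r.set j 1 else r) := rfl
      rw [hstep, ih _ (by split <;> simpa using hp)]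
      by_cases hpj : p = j
      · subst hpj
        by_cases hc : 0 < (Bm.getD i []).getD p 0
        · have hset : (if 0 < (Bm.getD i []).getD p 0 then r.set p 1 else r).getD p 0 = 1 := by
            rw [if_pos hc]; exact getD_set_self r p 1 0 hp
          rw [hset, if_pos (⟨by simp, hc⟩ : p ∈ p :: js ∧ 0 < (Bm.getD i []).getD p 0)]
          split <;> rfl
        · have h2 : ¬(p ∈ js ∧ 0 < (Bm.getD i []).getD p 0) := fun h => hc h.2
          have h3 : ¬(p ∈ p :: js ∧ 0 < (Bm.getD i []).getD p 0) := fun h => hc h.2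
          rw [if_neg h2, if_neg h3, if_neg hc]
      · have : (if 0 < (Bm.getD i []).getD j 0 then r.set j 1 else r).getD p 0 = r.getD p 0 := by
          split
          · exact getD_set_ne _ _ _ _ _ (fun hh => hpj hh.symm)
          · rfl
        rw [this]
        by_cases hin : p ∈ js
        · simp [hin]
        · have : p ∈ j :: js ↔ False := by simp [hpj, hin]
          simp [hin, this]

-- the outer i-loop: rows are updated independently
lemma foldl_outer (Bm : List (List Int)) (degs : List Int) (iter : Int) (n : Nat)
    (is : List Nat) (hnd : is.Nodup) (hin : ∀ i ∈ is, i < n)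
    (isP : List (List Int)) (ne : List (List (Int × Int)))
    (h1 : isP.length = n) (h2 : ne.length = n) :
    (is.foldl (outerF Bm degs iter n) (isP, ne)).1.length = n ∧
    (is.foldl (outerF Bm degs iter n) (isP, ne)).2.length = n ∧
    ∀ p : Nat,
      (p ∉ is → (is.foldl (outerF Bm degs iter n) (isP, ne)).1.getD p [] = isP.getD p []
              ∧ (is.foldl (outerF Bm degs iter n) (isP, ne)).2.getD p [] = ne.getD p [])
      ∧ (p ∈ is → (is.foldl (outerF Bm degs iter n) (isP, ne)).1.getD p []
                    = (rowL Bm degs iter p (List.range n) (isP.getD p [], ne.getD p [])).1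
               ∧ (is.foldl (outerF Bm degs iter n) (isP, ne)).2.getD p []
                    = (rowL Bm degs iter p (List.range n) (isP.getD p [], ne.getD p [])).2) := by
  induction is generalizing isP ne with
  | nil =>
      refine ⟨h1, h2, fun p => ⟨fun _ => ⟨rfl, rfl⟩, fun hp => absurd hp (by simp)⟩⟩
  | cons i is ih =>
      have hi : i < n := hin i (by simp)
      have hstep : outerF Bm degs iter n (isP, ne) i
          = (isP.set i (rowL Bm degs iter i (List.range n) (isP.getD i [], ne.getD i [])).1,
             ne.set i (rowL Bm degs iter i (List.range n) (isP.getD i [], ne.getD i [])).2) :=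
        foldl_inner Bm degs iter i (List.range n) isP ne (h1 ▸ hi) (h2 ▸ hi)
      rw [List.foldl_cons, hstep]
      obtain ⟨g1, g2, g3⟩ := ih (List.nodup_cons.mp hnd).2 (fun x hx => hin x (by simp [hx]))
        (isP.set i (rowL Bm degs iter i (List.range n) (isP.getD i [], ne.getD i [])).1)
        (ne.set i (rowL Bm degs iter i (List.range n) (isP.getD i [], ne.getD i [])).2)
        (by simpa using h1) (by simpa using h2)
      refine ⟨g1, g2, fun p => ⟨?_, ?_⟩⟩
      · intro hp
        have hpi : p ≠ i := fun hh => hp (by simp [hh])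
        have hps : p ∉ is := fun hh => hp (by simp [hh])
        obtain ⟨e1, e2⟩ := (g3 p).1 hps
        rw [e1, e2, getD_set_ne _ _ _ _ _ (fun hh => hpi hh.symm),
          getD_set_ne _ _ _ _ _ (fun hh => hpi hh.symm)]
        exact ⟨rfl, rfl⟩
      · intro hp
        by_cases hpi : p = i
        · subst hpi
          have hps : p ∉ is := (List.nodup_cons.mp hnd).1
          obtain ⟨e1, e2⟩ := (g3 p).1 hps
          rw [e1, e2, getD_set_self _ _ _ _ (h1 ▸ hi), getD_set_self _ _ _ _ (h2 ▸ hi)]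
          exact ⟨rfl, rfl⟩
        · have hps : p ∈ is := by
            rcases List.mem_cons.mp hp with hh | hh
            · exact absurd hh hpi
            · exact hh
          obtain ⟨e1, e2⟩ := (g3 p).2 hps
          rw [e1, e2, getD_set_ne _ _ _ _ _ (fun hh => hpi hh.symm),
            getD_set_ne _ _ _ _ _ (fun hh => hpi hh.symm)]
          exact ⟨rfl, rfl⟩

-- ---------- A's loop step and full loop ----------
def stepA (A : List (List Int))
    (st : List (List Int) × List (List Int) × List (List (Int × Int))) (iter : Int) :
    List (List Int) × List (List Int) × List (List (Int × Int)) :=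
  let B := pvMulA A st.1
  let inner := (List.range A.length).foldl (outerF B (degsOf A) iter A.length) (st.2.1, st.2.2)
  (B, inner.1, inner.2)

lemma color_k_neigh_eq (A : List (List Int)) (k : Int) :
    color_k_neigh A k
      = (((PySem.List.pyRange 1 (k + 1)).foldl (stepA A)
            (powM A 0, powM A 0, nAcc A 0)).2.2).map
          (fun l => PySem.List.sorted2 l (fun p => p.1) (fun p => p.2)) := by
  rfl

lemma mkE_succ_iff (A : List (List Int)) (t i j : Nat) :
    (mkE A (t + 1) i j = 1) ↔ (0 < pwE A (t + 1) i j ∨ mkE A t i j = 1) := by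
  rw [mkE]
  split
  · rename_i hp; simp [hp]
  · rename_i hp; simp [hp]

lemma stepA_char (A : List (List Int)) (t : Nat) :
    stepA A (powM A t, mkM A t, nAcc A t) ((t : Int) + 1)
      = (powM A (t + 1), mkM A (t + 1), nAcc A (t + 1)) := by
  have hn1 : (mkM A t).length = A.length := by simp [mkM]
  have hn2 : (nAcc A t).length = A.length := by simp [nAcc]
  have hB : pvMulA A (powM A t) = powM A (t + 1) := by
    rw [mulA_eq_mulB A (powM A t) (powM_length A t) (powM_rows A t)]; rfl
  show (pvMulA A (powM A t),
        ((List.range A.length).foldl (outerF (pvMulA A (powM A t)) (degsOf A) ((t : Int) + 1) A.length)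
          (mkM A t, nAcc A t)).1,
        ((List.range A.length).foldl (outerF (pvMulA A (powM A t)) (degsOf A) ((t : Int) + 1) A.length)
          (mkM A t, nAcc A t)).2) = _
  rw [hB]
  obtain ⟨g1, g2, g3⟩ := foldl_outer (powM A (t + 1)) (degsOf A) ((t : Int) + 1) A.length
    (List.range A.length) List.nodup_range (fun i hi => List.mem_range.mp hi)
    (mkM A t) (nAcc A t) hn1 hn2
  have hrow : ∀ p, p < A.length →
      rowL (powM A (t + 1)) (degsOf A) ((t : Int) + 1) p (List.range A.length)
          ((mkM A t).getD p [], (nAcc A t).getD p [])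
        = (updR (powM A (t + 1)) p (List.range A.length) ((List.range A.length).map (fun j => mkE A t p j)),
           nRow A p t ++ (List.range A.length).filterMap (fun j =>
              if 0 < ((powM A (t + 1)).getD p []).getD j 0 ∨ ((List.range A.length).map (fun j => mkE A t p j)).getD j 0 = 1
              then some (((t : Int) + 1), (degsOf A).getD j 0) else none)) := by
    intro p hp
    have e1 : (mkM A t).getD p [] = (List.range A.length).map (fun j => mkE A t p j) :=
      PySem.List.getD_map_range _ _ _ _ hp
    have e2 : (nAcc A t).getD p [] = nRow A p t :=
      PySem.List.getD_map_range _ _ _ _ hp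
    rw [e1, e2]
    exact rowL_spec _ _ _ _ _ _ _ List.nodup_range
      (fun j hj => by simpa using List.mem_range.mp hj)
  refine Prod.ext rfl (Prod.ext ?_ ?_)
  · -- isPath component
    apply List.ext_getElem
    · rw [g1]; simp [mkM]
    · intro p hp1 hp2
      have hpn : p < A.length := by rwa [g1] at hp1
      rw [← List.getD_eq_getElem _ [] hp1, ← List.getD_eq_getElem _ [] hp2,
        ((g3 p).2 (List.mem_range.mpr hpn)).1, hrow p hpn]
      have e3 : (mkM A (t + 1)).getD p [] = (List.range A.length).map (fun j => mkE A (t + 1) p j) :=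
        PySem.List.getD_map_range _ _ _ _ hpn
      rw [e3]
      apply List.ext_getElem
      · rw [updR_length]; simp
      · intro q hq1 hq2
        have hqn : q < A.length := by simpa using hq2
        have hql : q < ((List.range A.length).map (fun j => mkE A t p j)).length := by simpa using hqn
        rw [← List.getD_eq_getElem _ 0 hq1, ← List.getD_eq_getElem _ 0 hq2,
          updR_getD _ _ _ _ _ hql, PySem.List.getD_map_range _ _ _ _ hqn,
          PySem.List.getD_map_range _ _ _ _ hqn]
        have : (q ∈ List.range A.length ∧ 0 < ((powM A (t + 1)).getD p []).getD q 0)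
            ↔ 0 < pwE A (t + 1) p q := by
          simp [List.mem_range, hqn, pwE]
        rw [if_congr this rfl rfl, mkE]
  · -- neigh component
    apply List.ext_getElem
    · rw [g2]; simp [nAcc]
    · intro p hp1 hp2
      have hpn : p < A.length := by rwa [g2] at hp1
      rw [← List.getD_eq_getElem _ [] hp1, ← List.getD_eq_getElem _ [] hp2,
        ((g3 p).2 (List.mem_range.mpr hpn)).2, hrow p hpn]
      dsimp only
      have e4 : (nAcc A (t + 1)).getD p [] = nRow A p (t + 1) :=
        PySem.List.getD_map_range _ _ _ _ hpn
      rw [e4, nRow]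
      congr 1
      unfold emitL
      apply List.filterMap_congr
      intro q hq
      have hqn : q < A.length := List.mem_range.mp hq
      have hcond : (0 < ((powM A (t + 1)).getD p []).getD q 0
            ∨ ((List.range A.length).map (fun j => mkE A t p j)).getD q 0 = 1)
          ↔ mkE A (t + 1) p q = 1 := by
        rw [PySem.List.getD_map_range _ _ _ _ hqn, mkE_succ_iff]
        exact Iff.rfl
      rw [if_congr hcond rfl rfl]
      have : (((t + 1 : Nat) : Int)) = (t : Int) + 1 := by push_cast; ring
      rw [this]

lemma foldA (A : List (List Int)) (K : Nat) :
    (List.range K).foldl (fun st (m : Nat) => stepA A st ((m : Int) + 1)) (powM A 0, mkM A 0, nAcc A 0)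
      = (powM A K, mkM A K, nAcc A K) := by
  induction K with
  | zero => rfl
  | succ K ih => rw [List.range_succ, List.foldl_append, ih, List.foldl_cons, List.foldl_nil, stepA_char]

-- A's identity matrix (written with swapped binders) is mkM 0
lemma id_orient (A : List (List Int)) : powM A 0 = mkM A 0 := by
  unfold powM mkM
  apply List.map_congr_left; intro j _
  apply List.map_congr_left; intro i _
  simp [mkE, eq_comm]

-- ---------- B's loop ----------
def allZeroM (P : List (List Int)) : Bool := P.all (fun r => r.all (fun e => e == 0))
def allSetM (F : List (List (Option Int))) : Bool := F.all (fun r => r.all (fun x => !x.isNone))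

def stepB (A : List (List Int)) (st : List (List Int) × List (List (Option Int))) (t : Int) :
    List (List Int) × List (List (Option Int)) :=
  if allZeroM st.1 || allSetM st.2 then st
  else
    let P := pvMulB A st.1 A.length
    let fh := (List.range A.length).map (fun i => (List.range A.length).map (fun j =>
        if (st.2.getD i []).getD j none = none ∧ 0 < (P.getD i []).getD j 0 then some t
        else (st.2.getD i []).getD j none))
    (P, fh)

lemma degsB_eq (A : List (List Int)) :
    (PySem.List.enumerate A).map (fun p => p.2.sum + PySem.List.pyGetD p.2 p.1 0) = degsOf A := by
  rw [PySem.List.enumerate_eq_map_pyRange A [], PySem.List.len_eq, PySem.List.pyRange_zero_nat,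
    List.map_map, List.map_map]
  unfold degsOf
  apply List.map_congr_left
  intro i _
  simp [PySem.List.pyGetD_natCast]

lemma id_orientB (A : List (List Int)) :
    (List.range A.length).map (fun i => (List.range A.length).map (fun j => if i = j then (1 : Int) else 0))
      = powM A 0 := by
  unfold powM
  apply List.map_congr_left; intro x _
  apply List.map_congr_left; intro y _
  simp [eq_comm]

lemma fh0_eq (A : List (List Int)) :
    (List.range A.length).map (fun _ => List.replicate A.length (none : Option Int)) = fhM A 0 := by
  unfold fhM
  apply List.map_congr_left; intro x _
  show List.replicate A.length (none : Option Int) = (List.range A.length).map (fun j => fhE A 0 x j)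
  have : (fun (j : Nat) => fhE A 0 x j) = (fun _ => (none : Option Int)) := by
    funext j; rfl
  rw [this, List.map_const', List.length_range]

lemma color_k_neigh_alt_eq (A : List (List Int)) (k : Int) :
    color_k_neigh_alt A k
      = (List.range A.length).map (fun i =>
          PySem.List.sorted2
            ((List.range A.length).foldl (fun pairs j =>
                match (if j = i then some (1 : Int) else
                    ((((PySem.List.pyRange 1 (k + 1)).foldl (stepB A) (powM A 0, fhM A 0)).2).getD i []).getD j none) with
                | some s => pairs ++ (PySem.List.pyRange s (k + 1)).map (fun t => (t, (degsOf A).getD j 0))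
                | none => pairs) [((0 : Int), (degsOf A).getD i 0)])
            (fun p => p.1) (fun p => p.2)) := by
  unfold color_k_neigh_alt
  dsimp only
  rw [degsB_eq, id_orientB, fh0_eq]
  rfl

lemma zero_entries (P : List (List Int)) (h : allZeroM P = true) :
    ∀ u c : Nat, (P.getD u []).getD c 0 = 0 := by
  intro u c
  by_cases hu : u < P.length
  · have hrow : P.getD u [] ∈ P := by
      rw [List.getD_eq_getElem _ _ hu]; exact List.getElem_mem hu
    by_cases hc : c < (P.getD u []).length
    · have hmem : (P.getD u []).getD c 0 ∈ P.getD u [] := by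
        rw [List.getD_eq_getElem _ _ hc]; exact List.getElem_mem hc
      have := (List.all_eq_true.mp ((List.all_eq_true.mp h) _ hrow)) _ hmem
      simpa using this
    · rw [List.getD_eq_default _ _ (Nat.le_of_not_lt hc)]
  · rw [List.getD_eq_default _ _ (Nat.le_of_not_lt hu)]
    rfl

lemma mulB_zero (A P : List (List Int)) (n : Nat) (h : ∀ u c : Nat, (P.getD u []).getD c 0 = 0) :
    allZeroM (pvMulB A P n) = true := by
  unfold allZeroM pvMulB
  rw [List.all_eq_true]
  intro r hr
  rw [List.mem_map] at hr
  obtain ⟨row, _, rfl⟩ := hr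
  rw [List.all_eq_true]
  intro e he
  rw [List.mem_map] at he
  obtain ⟨c, _, rfl⟩ := he
  have : ((List.range (min row.length n)).map (fun u => row.getD u 0 * (P.getD u []).getD c 0)).sum = 0 := by
    apply List.sum_eq_zero
    intro x hx
    rw [List.mem_map] at hx
    obtain ⟨u, _, rfl⟩ := hx
    rw [h u c, mul_zero]
  simpa using this

lemma powM_zero_ge (A : List (List Int)) (s m : Nat) (hs : s ≤ m) (h : allZeroM (powM A s) = true) :
    allZeroM (powM A m) = true := by
  obtain ⟨d, rfl⟩ := Nat.exists_eq_add_of_le hs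
  induction d with
  | zero => exact h
  | succ d ih =>
      have : s + (d + 1) = (s + d) + 1 := by omega
      rw [this]
      show allZeroM (pvMulB A (powM A (s + d)) A.length) = true
      exact mulB_zero _ _ _ (zero_entries _ (ih (by omega)))

lemma fhM_succ_of_zero (A : List (List Int)) (t : Nat) (h : allZeroM (powM A t) = true) :
    fhM A (t + 1) = fhM A t := by
  have hz : ∀ i j : Nat, pwE A (t + 1) i j = 0 := by
    intro i j
    exact zero_entries _ (powM_zero_ge A t (t + 1) (by omega) h) i j
  unfold fhM
  apply List.map_congr_left; intro i _
  apply List.map_congr_left; intro j _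
  rw [fhE, hz i j]
  simp

lemma fhM_succ_of_set (A : List (List Int)) (t : Nat)
    (h : ∀ i j : Nat, i < A.length → j < A.length → fhE A t i j ≠ none) :
    fhM A (t + 1) = fhM A t := by
  unfold fhM
  apply List.map_congr_left; intro i hi
  apply List.map_congr_left; intro j hj
  rw [fhE]
  simp [h i j (List.mem_range.mp hi) (List.mem_range.mp hj)]

lemma fhM_entry (A : List (List Int)) (t i j : Nat) (hi : i < A.length) (hj : j < A.length) :
    ((fhM A t).getD i []).getD j none = fhE A t i j := by
  unfold fhM
  rw [PySem.List.getD_map_range _ _ _ _ hi, PySem.List.getD_map_range _ _ _ _ hj]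

lemma foldB (A : List (List Int)) (K : Nat) :
    ∃ s ≤ K, (List.range K).foldl (fun st (m : Nat) => stepB A st ((m : Int) + 1)) (powM A 0, fhM A 0)
        = (powM A s, fhM A s) ∧ fhM A K = fhM A s
        ∧ (s < K → (allZeroM (powM A s) || allSetM (fhM A s)) = true) := by
  induction K with
  | zero => exact ⟨0, le_refl 0, rfl, rfl, by omega⟩
  | succ K ih =>
      obtain ⟨s, hsK, hfold, hfh, hguard⟩ := ih
      rw [List.range_succ, List.foldl_append, hfold, List.foldl_cons, List.foldl_nil]
      by_cases hg : (allZeroM (powM A s) || allSetM (fhM A s)) = true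
      · refine ⟨s, by omega, ?_, ?_, fun _ => hg⟩
        · show stepB A (powM A s, fhM A s) ((K : Int) + 1) = (powM A s, fhM A s)
          unfold stepB
          dsimp only
          rw [if_pos hg]
        · rcases Bool.or_eq_true_iff.mp hg with hz | hset
          · rw [fhM_succ_of_zero A K (powM_zero_ge A s K hsK hz), hfh]
          · rw [fhM_succ_of_set, hfh]
            intro i j hi hj
            have h1 : fhE A K i j = fhE A s i j := by
              rw [← fhM_entry A K i j hi hj, ← fhM_entry A s i j hi hj, hfh]
            rw [h1]
            have hrow : (fhM A s).getD i [] ∈ fhM A s := by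
              have hlen : i < (fhM A s).length := by simpa [fhM] using hi
              rw [List.getD_eq_getElem _ _ hlen]; exact List.getElem_mem hlen
            have hlen2 : j < ((fhM A s).getD i []).length := by
              unfold fhM
              rw [PySem.List.getD_map_range _ _ _ _ hi]
              simpa using hj
            have hmem : ((fhM A s).getD i []).getD j none ∈ (fhM A s).getD i [] := by
              rw [List.getD_eq_getElem _ _ hlen2]; exact List.getElem_mem hlen2
            have := (List.all_eq_true.mp ((List.all_eq_true.mp hset) _ hrow)) _ hmem
            rw [← fhM_entry A s i j hi hj]
            exact Option.isSome_iff_ne_none.mp (by simpa using this)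
      · have hsEq : s = K := by
          rcases Nat.lt_or_ge s K with hlt | hge
          · exact absurd (hguard hlt) hg
          · omega
        subst hsEq
        refine ⟨s + 1, by omega, ?_, rfl, by omega⟩
        show stepB A (powM A s, fhM A s) ((s : Int) + 1) = (powM A (s + 1), fhM A (s + 1))
        unfold stepB
        dsimp only
        rw [if_neg hg]
        refine Prod.ext rfl ?_
        show (List.range A.length).map _ = fhM A (s + 1)
        unfold fhM
        apply List.map_congr_left; intro i hi
        apply List.map_congr_left; intro j hj
        rw [PySem.List.getD_map_range _ _ _ _ (List.mem_range.mp hi),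
          PySem.List.getD_map_range _ _ _ _ (List.mem_range.mp hj)]
        conv_rhs => rw [fhE]
        rfl

-- ---------- bridges between mkE and fhE ----------
lemma fhE_bounds (A : List (List Int)) (t i j : Nat) (s : Int) (h : fhE A t i j = some s) :
    1 ≤ s ∧ s ≤ (t : Int) := by
  induction t with
  | zero => simp [fhE] at h
  | succ t ih =>
      rw [fhE] at h
      split at h
      · have := Option.some_injective _ h
        push_cast; omega
      · have := ih h
        push_cast; push_cast at this; omega

lemma fhE_stable (A : List (List Int)) (t u i j : Nat) (ht : t ≤ u) (h : fhE A t i j ≠ none) :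
    fhE A u i j = fhE A t i j := by
  obtain ⟨d, rfl⟩ := Nat.exists_eq_add_of_le ht
  induction d with
  | zero => rfl
  | succ d ih =>
      have : t + (d + 1) = (t + d) + 1 := by omega
      rw [this, fhE, ih (by omega)]
      simp [h]

lemma fhE_present (A : List (List Int)) (u i j : Nat) (s : Int) (h : fhE A u i j = some s)
    (t : Nat) (h1 : s ≤ (t : Int)) (h2 : t ≤ u) : fhE A t i j = some s := by
  induction u with
  | zero => simp [fhE] at h
  | succ u ih =>
      rw [fhE] at h
      split at h
      · rename_i hc
        have hs : s = (u : Int) + 1 := (Option.some_injective _ h).symm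
        have ht : t = u + 1 := by omega
        rw [ht, fhE]
        simp [hc, hs]
      · rcases Nat.lt_or_ge u t with hu | hu
        · have : t = u + 1 := by omega
          rw [this, fhE]
          simp [h]
        · exact ih h hu

lemma mkE_iff (A : List (List Int)) (t i j : Nat) :
    mkE A t i j = 1 ↔ (i = j ∨ fhE A t i j ≠ none) := by
  induction t with
  | zero =>
      rw [mkE, fhE]
      split <;> simp_all
  | succ t ih =>
      rw [mkE, fhE]
      by_cases hp : 0 < pwE A (t + 1) i j
      · simp [hp]
        split <;> simp_all
      · simp [hp, ih]

-- ---------- emission: A's per-iteration appends vs B's per-node ranges ----------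
lemma pyfold_eq {σ : Type} (f : σ → Int → σ) (init : σ) (k : Int) :
    (PySem.List.pyRange 1 (k + 1)).foldl f init
      = (List.range k.toNat).foldl (fun st (m : Nat) => f st ((m : Int) + 1)) init := by
  rw [PySem.List.pyRange_one, List.foldl_map]
  have h1 : (k + 1 - 1).toNat = k.toNat := by norm_num
  have h2 : (fun (st : σ) (m : Nat) => f st (1 + (m : Int))) = (fun st (m : Nat) => f st ((m : Int) + 1)) := by
    funext st m; rw [Int.add_comm]
  rw [h1, h2]

lemma nRow_eq (A : List (List Int)) (i K : Nat) :
    nRow A i K = ((0 : Int), (degsOf A).getD i 0)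
      :: (List.range K).flatMap (fun m => emitL A (m + 1) i) := by
  induction K with
  | zero => simp [nRow]
  | succ K ih =>
      rw [nRow, ih, List.range_succ, List.flatMap_append]
      simp

lemma emitL_flat (A : List (List Int)) (m i : Nat) :
    emitL A m i = (List.range A.length).flatMap (fun j =>
      if mkE A m i j = 1 then [(((m : Nat) : Int), (degsOf A).getD j 0)] else []) := by
  unfold emitL
  rw [List.filterMap_eq_flatMap_toList]
  apply List.flatMap_congr
  intro j _
  split <;> rfl

-- arithmetic: collecting the iterations ≥ s out of 1..k
lemma range_flatMap_ite (K : Nat) (k : Int) (hK : K = k.toNat) (s : Int)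
    (h1 : 1 ≤ s) (h2 : s ≤ k) (f : Int → Int × Int) :
    (List.range K).flatMap (fun (m : Nat) => if s ≤ (m : Int) + 1 then [f ((m : Int) + 1)] else [])
      = (PySem.List.pyRange s (k + 1)).map f := by
  have hab : K = (s - 1).toNat + (k + 1 - s).toNat := by omega
  rw [hab, List.range_add, List.flatMap_append]
  have hfirst : (List.range (s - 1).toNat).flatMap
      (fun (m : Nat) => if s ≤ (m : Int) + 1 then [f ((m : Int) + 1)] else []) = [] := by
    rw [List.flatMap_eq_nil_iff]
    intro m hm
    have hm' : m < (s - 1).toNat := List.mem_range.mp hm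
    rw [if_neg (by omega)]
  have hsecond : ((List.range (k + 1 - s).toNat).map (fun (x : Nat) => (s - 1).toNat + x)).flatMap
      (fun (m : Nat) => if s ≤ (m : Int) + 1 then [f ((m : Int) + 1)] else [])
      = (List.range (k + 1 - s).toNat).map (fun (u : Nat) => f (s + (u : Int))) := by
    rw [List.flatMap_map]
    have : ∀ u ∈ List.range (k + 1 - s).toNat,
        (if s ≤ (((s - 1).toNat + u : Nat) : Int) + 1 then [f ((((s - 1).toNat + u : Nat) : Int) + 1)] else [])
          = [f (s + (u : Int))] := by
      intro u _
      rw [if_pos (by omega)]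
      congr 2
      omega
    rw [List.flatMap_congr this, ← List.map_eq_flatMap]
  rw [hfirst, hsecond, List.nil_append, PySem.List.pyRange_one, List.map_map]
  rfl

-- the j-th block of B's emission equals the j-entries collected over A's iterations
lemma per_j (A : List (List Int)) (k : Int) (i j : Nat) :
    (List.range k.toNat).flatMap (fun (m : Nat) =>
        if mkE A (m + 1) i j = 1 then [(((m + 1 : Nat) : Int), (degsOf A).getD j 0)] else [])
      = (match (if j = i then some (1 : Int) else fhE A k.toNat i j) with
         | some s => (PySem.List.pyRange s (k + 1)).map (fun t => (t, (degsOf A).getD j 0))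
         | none => []) := by
  by_cases hji : j = i
  · simp only [if_pos hji]
    have hcond : ∀ m ∈ List.range k.toNat,
        (if mkE A (m + 1) i j = 1 then [(((m + 1 : Nat) : Int), (degsOf A).getD j 0)] else [])
          = if (1 : Int) ≤ (m : Int) + 1 then [((m : Int) + 1, (degsOf A).getD j 0)] else [] := by
      intro m _
      rw [if_pos ((mkE_iff A (m + 1) i j).mpr (Or.inl hji.symm)), if_pos (by omega)]
      norm_cast
    rw [List.flatMap_congr hcond]
    by_cases hk : 1 ≤ k
    · exact range_flatMap_ite k.toNat k rfl 1 le_rfl hk (fun t => (t, (degsOf A).getD j 0))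
    · have hK : k.toNat = 0 := by omega
      rw [hK, List.range_zero, List.flatMap_nil, PySem.List.pyRange_one_eq_nil (by omega)]
      rfl
  · simp only [if_neg hji]
    cases hfh : fhE A k.toNat i j with
    | none =>
        rw [List.flatMap_eq_nil_iff]
        intro m hm
        rw [if_neg]
        intro hmk
        rcases (mkE_iff A (m + 1) i j).mp hmk with h | h
        · exact hji h.symm
        · have hst := fhE_stable A (m + 1) k.toNat i j
            (by have := List.mem_range.mp hm; omega) h
          rw [hfh] at hst
          exact h hst.symm
    | some s =>
        obtain ⟨hs1, hs2⟩ := fhE_bounds A k.toNat i j s hfh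
        have hK1 : 1 ≤ k.toNat := by omega
        have hsk : s ≤ k := by omega
        have hcond : ∀ m ∈ List.range k.toNat,
            (if mkE A (m + 1) i j = 1 then [(((m + 1 : Nat) : Int), (degsOf A).getD j 0)] else [])
              = if s ≤ (m : Int) + 1 then [((m : Int) + 1, (degsOf A).getD j 0)] else [] := by
          intro m hm
          have hmK : m < k.toNat := List.mem_range.mp hm
          have hiff : mkE A (m + 1) i j = 1 ↔ s ≤ (m : Int) + 1 := by
            rw [mkE_iff]
            constructor
            · rintro (h | h)
              · exact absurd h.symm hji
              · cases hfm : fhE A (m + 1) i j with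
                | none => exact absurd hfm h
                | some s' =>
                    have := fhE_stable A (m + 1) k.toNat i j (by omega) (by simp [hfm])
                    rw [hfh, hfm] at this
                    obtain ⟨_, hb⟩ := fhE_bounds A (m + 1) i j s' hfm
                    have hss : s = s' := Option.some_injective _ this
                    subst hss
                    push_cast at hb ⊢; omega
            · intro hsm
              refine Or.inr ?_
              rw [fhE_present A k.toNat i j s hfh (m + 1) (by push_cast; omega) (by omega)]
              simp
          by_cases hc : s ≤ (m : Int) + 1
          · rw [if_pos (hiff.mpr hc), if_pos hc]
            norm_cast
          · rw [if_neg (fun hh => hc (hiff.mp hh)), if_neg hc]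
        rw [List.flatMap_congr hcond]
        exact range_flatMap_ite k.toNat k rfl s hs1 hsk (fun t => (t, (degsOf A).getD j 0))

lemma Bfold_eq (A : List (List Int)) (k : Int) (i : Nat) (degs : List Int)
    (F : List (List (Option Int))) :
    (List.range A.length).foldl (fun pairs (j : Nat) =>
        match (if j = i then some (1 : Int) else (F.getD i []).getD j none) with
        | some s => pairs ++ (PySem.List.pyRange s (k + 1)).map (fun t => (t, degs.getD j 0))
        | none => pairs) [((0 : Int), degs.getD i 0)]
      = ((0 : Int), degs.getD i 0) :: (List.range A.length).flatMap (fun (j : Nat) =>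
          match (if j = i then some (1 : Int) else (F.getD i []).getD j none) with
          | some s => (PySem.List.pyRange s (k + 1)).map (fun t => (t, degs.getD j 0))
          | none => []) := by
  have hfun : (fun (pairs : List (Int × Int)) (j : Nat) =>
      match (if j = i then some (1 : Int) else (F.getD i []).getD j none) with
      | some s => pairs ++ (PySem.List.pyRange s (k + 1)).map (fun t => (t, degs.getD j 0))
      | none => pairs)
      = (fun pairs j => pairs ++ (match (if j = i then some (1 : Int) else (F.getD i []).getD j none) with
          | some s => (PySem.List.pyRange s (k + 1)).map (fun t => (t, degs.getD j 0))
          | none => [])) := by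
    funext pairs j
    cases (if j = i then some (1 : Int) else (F.getD i []).getD j none) <;> simp
  rw [hfun, PySem.List.foldl_append_eq_flatMap]
  rfl

-- ===== VERDICT (by name: the statement is the Claim_ definition above) =====
theorem color_k_neigh_spec : Claim_equal_color_k_neigh := by
  unfold Claim_equal_color_k_neigh
  intro A k _ _
  unfold Spec_color_k_neigh
  rw [color_k_neigh_eq, color_k_neigh_alt_eq, pyfold_eq, pyfold_eq]
  have hinit : (powM A 0, powM A 0, nAcc A 0) = (powM A 0, mkM A 0, nAcc A 0) :=
    congrArg (fun x => (powM A 0, x, nAcc A 0)) (id_orient A)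
  rw [hinit, foldA]
  obtain ⟨s, hsK, hfold, hfh, -⟩ := foldB A k.toNat
  rw [hfold]
  dsimp only
  rw [show fhM A s = fhM A k.toNat from hfh.symm]
  unfold nAcc
  rw [List.map_map]
  apply List.map_congr_left
  intro i hi
  have hin : i < A.length := List.mem_range.mp hi
  show PySem.List.sorted2 (nRow A i k.toNat) (fun p => p.1) (fun p => p.2) = _
  rw [Bfold_eq]
  apply sorted2_eq_of_perm
  rw [nRow_eq]
  apply List.Perm.cons
  have hA : (List.range k.toNat).flatMap (fun m => emitL A (m + 1) i)
      = (List.range k.toNat).flatMap (fun (m : Nat) => (List.range A.length).flatMap (fun (j : Nat) =>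
          if mkE A (m + 1) i j = 1 then [(((m + 1 : Nat) : Int), (degsOf A).getD j 0)] else [])) :=
    List.flatMap_congr (fun m _ => emitL_flat A (m + 1) i)
  rw [hA]
  refine (flatMap_comm_perm (List.range k.toNat) (List.range A.length)
    (fun (m : Nat) (j : Nat) =>
      if mkE A (m + 1) i j = 1 then [(((m + 1 : Nat) : Int), (degsOf A).getD j 0)] else [])).trans ?_
  have hG : (List.range A.length).flatMap (fun (j : Nat) => (List.range k.toNat).flatMap (fun (m : Nat) =>
        if mkE A (m + 1) i j = 1 then [(((m + 1 : Nat) : Int), (degsOf A).getD j 0)] else []))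
      = (List.range A.length).flatMap (fun (j : Nat) =>
          match (if j = i then some (1 : Int) else ((fhM A k.toNat).getD i []).getD j none) with
          | some s => (PySem.List.pyRange s (k + 1)).map (fun t => (t, (degsOf A).getD j 0))
          | none => []) := by
    apply List.flatMap_congr
    intro j hj
    rw [fhM_entry A k.toNat i j hin (List.mem_range.mp hj)]
    exact per_j A k i j
  rw [hG]
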